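-- pv_equiv track=rewrite | github.com/Farsyte/live-coding | asl/diskdef.py | get_blkshf_blkmsk
-- ===== SOURCE A (Python) =====
-- def get_blkshf_blkmsk(bls):
--     blkval = bls // 128
--     blkshf = 0
--     blkmsk = 0;
--     for i in range(16):
--         if blkval == 1:
--             break
--         blkshf = blkshf + 1
--         blkmsk = (blkmsk << 1) | 1
--         blkval = blkval // 2
--     return blkshf, blkmsk
-- ===== SOURCE B (Python) =====
-- def get_blkshf_blkmsk(bls):
--     blkval = bls // 128
--     if blkval >= 1:
--         blkshf = min(16, blkval.bit_length() - 1)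
--     else:
--         # no positive power of two to find: the search is exhausted at the cap
--         blkshf = 16
--     return blkshf, (1 << blkshf) - 1
-- ===== Notes on version B (the rewrite author's own statement) =====
-- stated objective: simpler
-- what changed: Replaces the 16-iteration halving loop (with break at 1) by a single closed-form bit_length computation: blkshf = min(16, (bls//128).bit_length()-1) for positive block values, 16 otherwise, and blkmsk = (1<<blkshf)-1.
import Mathlib
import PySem

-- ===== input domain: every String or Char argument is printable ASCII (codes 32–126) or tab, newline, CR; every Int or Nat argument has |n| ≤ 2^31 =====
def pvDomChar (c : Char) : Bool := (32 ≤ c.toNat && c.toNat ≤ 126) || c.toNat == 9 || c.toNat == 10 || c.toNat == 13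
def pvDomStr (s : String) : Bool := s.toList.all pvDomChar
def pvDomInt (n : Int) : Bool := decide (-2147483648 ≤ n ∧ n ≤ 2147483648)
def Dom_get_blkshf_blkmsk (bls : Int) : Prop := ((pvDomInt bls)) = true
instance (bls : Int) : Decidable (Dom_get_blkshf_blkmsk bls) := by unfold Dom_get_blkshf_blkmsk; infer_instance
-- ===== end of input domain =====

-- B replaces A's 16-step halving loop by a single bit-length computation (simpler closed form).

-- ===== PORT A =====
-- the 'for i in range(16)' loop with its break, as fuel recursion over the state (blkval, blkshf, blkmsk)
def blkLoop : Nat → (Int × Int × Int) → (Int × Int × Int)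
  | 0, st => st
  | Nat.succ n, (blkval, blkshf, blkmsk) =>
    if blkval = 1 then (blkval, blkshf, blkmsk)
    else blkLoop n (PySem.Int.floordiv blkval 2, blkshf + 1,
                    PySem.Int.bor (blkmsk <<< (1 : Nat)) 1)

def get_blkshf_blkmsk (bls : Int) : Int × Int :=
  let st := blkLoop 16 (PySem.Int.floordiv bls 128, 0, 0)
  (st.2.1, st.2.2)

-- ===== PORT B =====
def get_blkshf_blkmsk_alt (bls : Int) : Int × Int :=
  let blkval := PySem.Int.floordiv bls 128
  let blkshf : Nat := if 1 ≤ blkval then min 16 (PySem.Int.bitLength blkval - 1) else 16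
  ((blkshf : Int), ((1 : Int) <<< blkshf) - 1)

-- ===== PRECONDITION & SPEC =====
def Spec_get_blkshf_blkmsk (bls : Int) (out : Int × Int) : Prop := out = get_blkshf_blkmsk_alt bls
instance (bls : Int) (out : Int × Int) : Decidable (Spec_get_blkshf_blkmsk bls out) := by unfold Spec_get_blkshf_blkmsk; infer_instance

-- ===== CLAIM (what is proved, stated in full; the proofs are below) =====
def Claim_equal_get_blkshf_blkmsk : Prop := ∀ (bls : Int), Dom_get_blkshf_blkmsk bls → Spec_get_blkshf_blkmsk bls (get_blkshf_blkmsk bls)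

-- ===== LEMMAS AND PROOFS =====

-- (2^c - 1) << 1 | 1 = 2^(c+1) - 1, first on Nat bits, then on Int
theorem pv_natbit (c : Nat) : ((2 ^ c - 1) <<< 1) ||| 1 = 2 ^ (c + 1) - 1 := by
  apply Nat.eq_of_testBit_eq
  intro i
  rcases i with _ | i
  · simp
  · have h1 : Nat.testBit 1 (i + 1) = false := by
      have := Nat.testBit_two_pow (n := 0) (m := i + 1)
      simpa using this
    simp only [Nat.testBit_or, Nat.testBit_shiftLeft, Nat.testBit_two_pow_sub_one, h1]
    simp

theorem pv_intbit (c : Nat) :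
    PySem.Int.bor (((2 : Int) ^ c - 1) <<< (1 : Nat)) 1 = 2 ^ (c + 1) - 1 := by
  have hc : (1 : Nat) ≤ 2 ^ c := Nat.one_le_two_pow
  have h0 : ((2 : Int) ^ c - 1) = ((2 ^ c - 1 : Nat) : Int) := by push_cast [hc]; ring
  have h1 : ((2 : Int) ^ c - 1) <<< (1 : Nat) = (((2 ^ c - 1) <<< 1 : Nat) : Int) := by
    rw [h0]
    simp [Int.shiftLeft_eq, Nat.shiftLeft_eq]
  rw [h1, show ((1 : Int)) = ((1 : Nat) : Int) by simp,
      PySem.Int.bor_natCast, pv_natbit]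
  have : (1 : Nat) ≤ 2 ^ (c + 1) := Nat.one_le_two_pow
  push_cast [this]; ring

theorem pv_loop_neg (n : Nat) : ∀ (v shf : Int) (c : Nat), v ≤ 0 →
    (blkLoop n (v, shf, (2 : Int) ^ c - 1)).2 = (shf + n, 2 ^ (c + n) - 1) := by
  induction n with
  | zero => intro v shf c _; simp [blkLoop]
  | succ n ih =>
    intro v shf c hv
    have hne : ¬ (v = 1) := by omega
    have hv' : PySem.Int.floordiv v 2 ≤ 0 := by
      have := (PySem.Int.floordiv_lt_iff_lt_mul (a := v) (b := 2) (q := 1) (by omega)).2 (by omega)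
      omega
    simp only [blkLoop, hne, if_false, pv_intbit]
    rw [ih _ _ (c + 1) hv']
    simp only [Prod.mk.injEq]
    refine ⟨by push_cast; omega, by rw [show c + 1 + n = c + (n + 1) by omega]⟩

theorem pv_bitLength_pos {v : Int} (hv : 1 ≤ v) : 1 ≤ PySem.Int.bitLength v := by
  rw [PySem.Int.bitLength_of_pos (by omega)]
  omega

theorem pv_loop_pos (n : Nat) : ∀ (v shf : Int) (c : Nat), 1 ≤ v →
    (blkLoop n (v, shf, (2 : Int) ^ c - 1)).2 =
      (shf + min n (PySem.Int.bitLength v - 1),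
       2 ^ (c + min n (PySem.Int.bitLength v - 1)) - 1) := by
  induction n with
  | zero => intro v shf c _; simp [blkLoop]
  | succ n ih =>
    intro v shf c hv
    by_cases h1 : v = 1
    · subst h1
      have : PySem.Int.bitLength 1 = 1 := by decide
      simp [blkLoop, this]
    · have hv2 : 2 ≤ v := by omega
      have hv' : 1 ≤ PySem.Int.floordiv v 2 :=
        (PySem.Int.le_floordiv_iff_mul_le (a := v) (b := 2) (q := 1) (by omega)).2 (by omega)
      have hL : PySem.Int.bitLength v = PySem.Int.bitLength (PySem.Int.floordiv v 2) + 1 :=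
        PySem.Int.bitLength_of_pos (by omega)
      have hL1 : 1 ≤ PySem.Int.bitLength (PySem.Int.floordiv v 2) := pv_bitLength_pos hv'
      simp only [blkLoop, h1, if_false, pv_intbit]
      rw [ih _ _ (c + 1) hv']
      have hmin : min (n + 1) (PySem.Int.bitLength v - 1)
          = min n (PySem.Int.bitLength (PySem.Int.floordiv v 2) - 1) + 1 := by omega
      rw [hmin]
      simp only [Prod.mk.injEq]
      refine ⟨by push_cast; omega,
        by rw [show c + 1 + min n (PySem.Int.bitLength (PySem.Int.floordiv v 2) - 1)
             = c + (min n (PySem.Int.bitLength (PySem.Int.floordiv v 2) - 1) + 1) by omega]⟩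

-- ===== VERDICT (by name: the statement is the Claim_ definition above) =====
theorem get_blkshf_blkmsk_spec : Claim_equal_get_blkshf_blkmsk := by
  intro bls _
  unfold Spec_get_blkshf_blkmsk get_blkshf_blkmsk get_blkshf_blkmsk_alt
  set v := PySem.Int.floordiv bls 128 with hvdef
  by_cases hv : 1 ≤ v
  · have := pv_loop_pos 16 v 0 0 hv
    simp only [show ((0 : Int) = 2 ^ 0 - 1) by norm_num] at *
    rw [this]
    simp [hv, Int.shiftLeft_eq]
  · have hv0 : v ≤ 0 := by omega
    have := pv_loop_neg 16 v 0 0 hv0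
    simp only [show ((0 : Int) = 2 ^ 0 - 1) by norm_num] at *
    rw [this]
    simp [hv]
    decide
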